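-- pv_equiv track=rewrite | github.com/bxinformations/BX-information | CS/CSE202/td4/owndiv.py | dual_dac
-- ===== SOURCE A (Python) =====
-- def dual_dac(x):
--     t = x
--     n = 0
--     while (t != 0):
--         n += 1
--         t >>= 1
--
--     if (x == (1 << (n - 1))):
--         return 1 << n
--
--     n2 = (n + 1) >> 1
--     x2 = (x) >> (n >> 1)
--     dx2 = dual_dac(x2)
--     d = ((dx2 << 1) * ((1 << (n + n2)) - x * dx2)) >> (n2 << 1)
--
--     r = (1 << (2 * n - 1)) - d * x
--     t = 0
--     if (r < 0):
--         while (r < 0):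
--             r += x
--             t += 1
--     elif (r >= x):
--         while (r >= x):
--             r -= x
--             t += 1
--     return d + t
-- ===== SOURCE B (Python) =====
-- def dual_dac(x):
--     # closed form: A computes floor(2^(2n-1)/x) where n = bit length of x
--     n = x.bit_length()
--     return (1 << (2 * n - 1)) // x
-- ===== Notes on version B (the rewrite author's own statement) =====
-- stated objective: simpler
-- what changed: Replaced the recursive Newton-doubling reciprocal with its bit-counting loop, recursion and correction loops by the single closed form (1 << (2*n-1)) // x with n = x.bit_length(), which A provably computes.
-- outside the precondition, e.g. on dual_dac(0): A raises ValueError, B raises ValueError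
import Mathlib
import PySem

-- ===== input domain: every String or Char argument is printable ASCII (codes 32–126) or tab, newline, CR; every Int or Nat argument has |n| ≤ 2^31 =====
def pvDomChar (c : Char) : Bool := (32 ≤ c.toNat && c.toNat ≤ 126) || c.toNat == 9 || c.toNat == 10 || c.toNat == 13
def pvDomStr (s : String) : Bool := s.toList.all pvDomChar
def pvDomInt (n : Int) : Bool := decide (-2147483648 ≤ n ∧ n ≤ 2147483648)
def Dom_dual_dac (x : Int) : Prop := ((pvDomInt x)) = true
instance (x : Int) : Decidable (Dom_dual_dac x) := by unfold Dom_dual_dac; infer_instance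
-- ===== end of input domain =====

-- B replaces A's recursive Newton doubling by the closed form (1 << (2*n-1)) // x, its provable value.

-- ===== PORT A =====
-- Python shifts a << k, a >> k with k ≥ 0 are Lean's <<< / >>> on Nat counts; every shift
-- count A uses is ≥ 0 on Pre_ (Python raises ValueError on a negative count, excluded there).
def pvShl (a k : Int) : Int := a <<< k.toNat
def pvShr (a k : Int) : Int := a >>> k.toNat

-- the 'while t != 0: n += 1; t >>= 1' loop; fuel makes it total (never exhausted on Pre_)
def pvBitLoop : Nat → Int → Int → Int
  | 0, _, n => n
  | f+1, t, n => if t = 0 then n else pvBitLoop f (pvShr t 1) (n+1)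

-- the 'while r < 0: r += x; t += 1' loop, returning the final t
def pvUp : Nat → Int → Int → Int → Int
  | 0, _, _, t => t
  | f+1, x, r, t => if r < 0 then pvUp f x (r+x) (t+1) else t

-- the 'while r >= x: r -= x; t += 1' loop, returning the final t
def pvDown : Nat → Int → Int → Int → Int
  | 0, _, _, t => t
  | f+1, x, r, t => if x ≤ r then pvDown f x (r-x) (t+1) else t

def pvDacF : Nat → Int → Int
  | 0, _ => 0
  | f+1, x =>
    let n := pvBitLoop (x.natAbs + 1) x 0
    if x = pvShl 1 (n-1) then pvShl 1 n
    else
      let n2 := pvShr (n+1) 1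
      let x2 := pvShr x (pvShr n 1)
      let dx2 := pvDacF f x2
      let d := pvShr ((pvShl dx2 1) * (pvShl 1 (n+n2) - x*dx2)) (pvShl n2 1)
      let r := pvShl 1 (2*n-1) - d*x
      if r < 0 then d + pvUp (r.natAbs+1) x r 0
      else if x ≤ r then d + pvDown (r.natAbs+1) x r 0
      else d + 0

def dual_dac (x : Int) : Int := pvDacF (x.natAbs + 1) x

-- ===== PORT B =====
def dual_dac_alt (x : Int) : Int :=
  PySem.Int.floordiv ((1 : Int) <<< (2 * (PySem.Int.bitLength x : Int) - 1).toNat) x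

-- ===== PRECONDITION & SPEC =====
-- Pre_ excludes x = 0 (A raises ValueError: negative shift count) and x < 0 (A's bit-count
-- loop never terminates); A returns a value exactly on x ≥ 1.
def Pre_dual_dac (x : Int) : Prop := 1 ≤ x
instance (x : Int) : Decidable (Pre_dual_dac x) := by unfold Pre_dual_dac; infer_instance
def pvWitness_dual_dac : Int := 7

def Spec_dual_dac (x : Int) (out : Int) : Prop := out = dual_dac_alt x
instance (x : Int) (out : Int) : Decidable (Spec_dual_dac x out) := by unfold Spec_dual_dac; infer_instance

-- ===== CLAIM (what is proved, stated in full; the proofs are below) =====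
def Claim_equal_dual_dac : Prop := ∀ (x : Int), Dom_dual_dac x → Pre_dual_dac x → Spec_dual_dac x (dual_dac x)

-- ===== LEMMAS AND PROOFS =====

theorem pvShr_floordiv (a k : Int) : pvShr a k = PySem.Int.floordiv a (2 ^ k.toNat) := by
  rw [pvShr, Int.shiftRight_eq_div_pow,
      PySem.Int.floordiv_eq_ediv_of_pos (by positivity)]
  push_cast
  ring

theorem pvShl_pow (a k : Int) : pvShl a k = a * 2 ^ k.toNat := by
  rw [pvShl, Int.shiftLeft_eq]

-- the bit-counting loop computes acc + bit_length t (for t ≥ 0, with enough fuel)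
theorem pvBitLoop_eq : ∀ (f : Nat) (t acc : Int), 0 ≤ t → t.natAbs < f →
    pvBitLoop f t acc = acc + (PySem.Int.bitLength t : Int) := by
  intro f
  induction f with
  | zero => intro t acc _ h; omega
  | succ f ih =>
    intro t acc ht hf
    by_cases h0 : t = 0
    · simp [pvBitLoop, h0, PySem.Int.bitLength_zero]
    · have hpos : 0 < t := by omega
      have hdiv : pvShr t 1 = t / 2 := by
        rw [pvShr_floordiv, PySem.Int.floordiv_eq_ediv_of_pos (by norm_num)]
        norm_num
      rw [pvBitLoop, if_neg h0, hdiv,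
          ih (t / 2) (acc + 1) (by omega) (by omega),
          PySem.Int.bitLength_of_pos hpos,
          PySem.Int.floordiv_eq_ediv_of_pos (by norm_num)]
      push_cast; ring

-- the subtracting loop is floor division by repeated subtraction
theorem pvDown_eq : ∀ (f : Nat) (x r t : Int), 0 < x → 0 ≤ r → r.natAbs < f →
    pvDown f x r t = t + r / x := by
  intro f
  induction f with
  | zero => intro x r t _ _ h; omega
  | succ f ih =>
    intro x r t hx hr hf
    by_cases h : x ≤ r
    · have : (r - x) / x + 1 = r / x := by
        have := Int.add_mul_ediv_right (r - x) 1 (by omega : x ≠ 0)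
        simpa using this.symm
      rw [pvDown, if_pos h, ih x (r-x) (t+1) hx (by omega) (by omega)]
      omega
    · have : r / x = 0 := Int.ediv_eq_zero_of_lt hr (by omega)
      rw [pvDown, if_neg h, this]; omega

-- any estimate from A's 'd' formula never overestimates: d * x ≤ 2^(2n-1)
-- (algebra: 2·x·N = A² − (A − 2·x·dx2)² ≤ A², independent of dx2's value)
theorem d_le (x dx2 : Int) (nn m : Nat) (hx : 0 < x) (hnn : 1 ≤ nn) :
    (pvShr ((pvShl dx2 1) * (pvShl 1 ((nn:Int)+(m:Int)) - x*dx2)) (pvShl (m:Int) 1)) * x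
      ≤ 2 ^ (2*nn - 1) := by
  set N : Int := (pvShl dx2 1) * (pvShl 1 ((nn:Int)+(m:Int)) - x*dx2) with hN
  have h2m : pvShl (m:Int) 1 = (m:Int) * 2 := by rw [pvShl_pow]; norm_num
  have hshr : pvShr N (pvShl (m:Int) 1) = N / 2 ^ (2*m) := by
    rw [h2m, pvShr_floordiv, PySem.Int.floordiv_eq_ediv_of_pos (by positivity)]
    congr 2
    omega
  set d : Int := N / 2 ^ (2*m) with hd
  have hfloor : d * 2 ^ (2*m) ≤ N := Int.ediv_mul_le N (by positivity)
  have hA : pvShl 1 ((nn:Int)+(m:Int)) = 2 ^ (nn + m) := by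
    rw [pvShl_pow, one_mul]; congr 1
  set A : Int := 2 ^ (nn + m) with hAdef
  have hsq : 2 * x * N ≤ A ^ 2 := by
    have hsl : pvShl dx2 1 = dx2 * 2 := by rw [pvShl_pow]; norm_num
    have : 2 * x * N = A ^ 2 - (A - 2 * (x * dx2)) ^ 2 := by
      rw [hN, hA, hsl]; ring
    nlinarith [sq_nonneg (A - 2 * (x * dx2))]
  have hmul : 2 * x * (d * 2 ^ (2*m)) ≤ A ^ 2 := by
    have := mul_le_mul_of_nonneg_left hfloor (by omega : (0:Int) ≤ 2 * x)
    linarith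
  have hApow : A ^ 2 = 2 ^ (2*m + 1) * 2 ^ (2*nn - 1) := by
    rw [hAdef, ← pow_add, ← pow_mul]
    congr 1
    omega
  have hrw : 2 * x * (d * 2 ^ (2*m)) = 2 ^ (2*m + 1) * (d * x) := by
    rw [pow_succ]; ring
  have : 2 ^ (2*m + 1) * (d * x) ≤ 2 ^ (2*m + 1) * 2 ^ (2*nn - 1) := by
    rw [← hrw, ← hApow]; exact hmul
  have := le_of_mul_le_mul_left this (by positivity)
  rw [hshr]
  exact this

theorem dual_dac_spec_aux (f : Nat) (x : Int) (hx : 1 ≤ x) :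
    pvDacF (f+1) x = dual_dac_alt x := by
  have hxpos : 0 < x := hx
  set nn : Nat := PySem.Int.bitLength x with hnn
  have hn1 : 1 ≤ nn := by
    by_contra h
    have h0 : nn = 0 := by omega
    have := PySem.Int.lt_two_pow_bitLength x
    rw [← hnn, h0] at this
    simp at this
    omega
  have hloop : pvBitLoop (x.natAbs + 1) x 0 = (nn : Int) :=
    by rw [pvBitLoop_eq (x.natAbs + 1) x 0 (by omega) (by omega), ← hnn]; ring
  have hM : pvShl 1 (2*(nn:Int)-1) = 2 ^ (2*nn - 1) := by
    rw [pvShl_pow, one_mul]; congr 1; omega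
  have halt : dual_dac_alt x = PySem.Int.floordiv (2 ^ (2*nn - 1)) x := by
    rw [dual_dac_alt, Int.shiftLeft_eq, ← hnn, one_mul]
    congr 2
    omega
  rw [halt, PySem.Int.floordiv_eq_ediv_of_pos hxpos]
  rw [pvDacF]
  simp only [hloop]
  by_cases hb : x = pvShl 1 ((nn:Int)-1)
  · -- power-of-two branch: x = 2^(nn-1), result 2^nn = 2^(2nn-1)/x exactly
    rw [if_pos hb]
    have hx2 : x = 2 ^ (nn - 1) := by rw [hb, pvShl_pow, one_mul]; congr 1; omega
    have hsplit : (2:Int) ^ (2*nn - 1) = 2 ^ nn * x := by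
      rw [hx2, ← pow_add]; congr 1; omega
    rw [hsplit, Int.mul_ediv_cancel _ (by omega), pvShl_pow, one_mul]
    congr 1
  · rw [if_neg hb]
    set n2 : Int := pvShr ((nn:Int)+1) 1 with hn2def
    have hm : ∃ m : Nat, n2 = (m : Int) := by
      have : n2 = ((nn:Int)+1) / 2 := by
        rw [hn2def, pvShr_floordiv, PySem.Int.floordiv_eq_ediv_of_pos (by norm_num)]
        norm_num
      exact ⟨((nn+1)/2 : Nat), by rw [this]; push_cast; omega⟩
    obtain ⟨m, hmeq⟩ := hm
    set dx2 : Int := pvDacF f (pvShr x (pvShr (nn:Int) 1)) with hdx2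
    set d : Int := pvShr ((pvShl dx2 1) * (pvShl 1 ((nn:Int)+n2) - x*dx2)) (pvShl n2 1) with hddef
    have hdle : d * x ≤ 2 ^ (2*nn - 1) := by
      rw [hddef, hmeq]
      exact d_le x dx2 nn m hxpos hn1
    set r : Int := pvShl 1 (2*(nn:Int)-1) - d*x with hrdef
    have hr0 : 0 ≤ r := by rw [hrdef, hM]; omega
    have hnotneg : ¬ r < 0 := by omega
    rw [if_neg hnotneg]
    have hMr : (2:Int) ^ (2*nn-1) = r + d * x := by rw [hrdef, hM]; ring
    have hsum : (2:Int) ^ (2*nn-1) / x = d + r / x := by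
      rw [hMr, Int.add_mul_ediv_right r d (by omega : x ≠ 0)]
      ring
    by_cases hge : x ≤ r
    · rw [if_pos hge, pvDown_eq (r.natAbs+1) x r 0 hxpos hr0 (by omega), hsum]
      ring
    · rw [if_neg hge, hsum]
      have : r / x = 0 := Int.ediv_eq_zero_of_lt hr0 (by omega)
      omega

-- ===== VERDICT (by name: the statement is the Claim_ definition above) =====
theorem dual_dac_spec : Claim_equal_dual_dac := by
  intro x _ hx
  rw [Spec_dual_dac, dual_dac]
  exact dual_dac_spec_aux x.natAbs x hx
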